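-- pv_equiv track=rewrite | github.com/anaselmi/simple-programs | simple/scrabble.py | scrabble
-- ===== SOURCE A (Python) =====
-- def scrabble(letters, word):
--     word = [x for x in word]
--     letters = [x for x in letters]
--
--     for letter in word:
--         if letter not in letters:
--             if "?" in letters:
--                 letters.remove("?")
--             else:
--                 return False
--         else:
--             letters.remove(letter)
--     return True
-- ===== SOURCE B (Python) =====
-- def scrabble(letters, word):
--     wc = {}
--     for x in word:
--         wc[x] = wc.get(x, 0) + 1
--     lc = {}
--     for x in letters:
--         lc[x] = lc.get(x, 0) + 1
--     need = 0
--     for c, n in wc.items():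
--         if c == "?":
--             need += n
--         else:
--             need += max(0, n - lc.get(c, 0))
--     return need <= lc.get("?", 0)
-- ===== Notes on version B (the rewrite author's own statement) =====
-- stated objective: faster
-- what changed: Replaces A's per-letter consumption simulation (a membership test plus list.remove for every word letter, each a scan of letters) with two frequency maps built once; the wildcard demand is the sum over distinct word characters of max(0, word_count - letters_count) (plus literal '?' characters in word), compared against the number of '?' tiles.
import Mathlib
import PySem

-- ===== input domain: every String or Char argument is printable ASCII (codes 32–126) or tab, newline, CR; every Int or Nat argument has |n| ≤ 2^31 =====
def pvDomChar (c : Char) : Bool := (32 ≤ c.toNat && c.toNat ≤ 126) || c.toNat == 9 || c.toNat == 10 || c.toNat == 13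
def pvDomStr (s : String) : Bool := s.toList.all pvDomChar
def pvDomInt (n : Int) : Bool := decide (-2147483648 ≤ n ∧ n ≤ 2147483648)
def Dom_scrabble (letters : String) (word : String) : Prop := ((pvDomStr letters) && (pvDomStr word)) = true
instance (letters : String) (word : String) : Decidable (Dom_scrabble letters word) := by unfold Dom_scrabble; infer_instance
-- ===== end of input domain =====

-- B replaces A's per-letter consumption loop by two frequency maps and one aggregate
-- comparison of wildcard demand against the '?' supply (objective: alternative algorithm).

-- ===== PORT A =====
-- the for-loop over word, carrying the mutable `letters` list; `letters.remove(x)` under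
-- the membership guard is exactly List.erase (PySem.List.remove?_eq_some_erase)
def scrabbleLoopA : List Char → List Char → Bool
  | _, [] => true                                 -- loop finished: return True
  | letters, c :: rest =>
    if ¬ (c ∈ letters) then                       -- if letter not in letters
      if '?' ∈ letters then scrabbleLoopA (letters.erase '?') rest   -- letters.remove("?")
      else false                                  -- return False
    else scrabbleLoopA (letters.erase c) rest     -- letters.remove(letter)

def scrabble (letters : String) (word : String) : Bool :=
  -- word = [x for x in word]; letters = [x for x in letters]
  scrabbleLoopA letters.toList word.toList

-- ===== PORT B =====
def scrabble_alt (letters : String) (word : String) : Bool :=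
  -- wc = counting dict of word; lc = counting dict of letters (the d[x] = d.get(x,0)+1 loop = Dict.counter)
  let wc := PySem.Dict.counter word.toList
  let lc := PySem.Dict.counter letters.toList
  -- for c, n in wc.items(): accumulate need
  let need : Int := wc.items.foldl
    (fun acc p => if p.1 = '?' then acc + p.2 else acc + max 0 (p.2 - lc.getD p.1 0)) 0
  decide (need ≤ lc.getD '?' 0)

-- ===== PRECONDITION & SPEC =====
def Spec_scrabble (letters : String) (word : String) (out : Bool) : Prop := out = scrabble_alt letters word
instance (letters : String) (word : String) (out : Bool) : Decidable (Spec_scrabble letters word out) := by unfold Spec_scrabble; infer_instance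

-- ===== CLAIM (what is proved, stated in full; the proofs are below) =====
def Claim_equal_scrabble : Prop := ∀ (letters : String) (word : String), Dom_scrabble letters word → Spec_scrabble letters word (scrabble letters word)

-- ===== LEMMAS AND PROOFS =====

theorem scrabble_alt_def (letters word : String) : scrabble_alt letters word =
    decide (((PySem.Dict.counter word.toList).items.foldl
      (fun acc p => if p.1 = '?' then acc + p.2
        else acc + max 0 (p.2 - (PySem.Dict.counter letters.toList).getD p.1 0)) (0 : Int))
      ≤ (PySem.Dict.counter letters.toList).getD '?' 0) := rfl

-- wildcard demand of `ws` against the multiset `ls`, consuming matching non-'?' letters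
def demandW : List Char → List Char → Nat
  | _, [] => 0
  | ls, c :: rest => if c ≠ '?' ∧ c ∈ ls then demandW (ls.erase c) rest else 1 + demandW ls rest

-- removing a '?' tile does not change the demand
theorem demandW_erase_q (ws : List Char) : ∀ ls : List Char,
    demandW (ls.erase '?') ws = demandW ls ws := by
  induction ws with
  | nil => intro ls; rfl
  | cons c rest ih =>
    intro ls
    by_cases hq : c = '?'
    · subst hq
      simp [demandW, ih]
    · by_cases hm : c ∈ ls
      · have hm' : c ∈ ls.erase '?' := (List.mem_erase_of_ne hq).mpr hm
        simp only [demandW, hq, hm, hm', and_true, ne_eq, not_false_iff, if_true]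
        rw [List.erase_comm, ih]
      · have hm' : c ∉ ls.erase '?' := fun h => hm (List.mem_of_mem_erase h)
        simp [demandW, hq, hm, hm', ih]

-- splitting the overflow sum at the head character, in an omega-friendly form
theorem sum_cons_split (c : Char) (rest : List Char) (g h : Char → ℕ)
    (hgh : ∀ x, x ≠ c → g x = h x) :
    (∑ x ∈ (c :: rest).toFinset, g x) + (if c ∈ rest then h c else 0)
      = g c + ∑ x ∈ rest.toFinset, h x := by
  have h1 : (c :: rest).toFinset = insert c (rest.toFinset.erase c) := by
    ext x
    by_cases hx : x = c <;> simp [hx]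
  have h2 : ∑ x ∈ rest.toFinset, h x = (if c ∈ rest then h c else 0) + ∑ x ∈ rest.toFinset.erase c, h x := by
    by_cases hcr : c ∈ rest
    · rw [if_pos hcr]
      exact (Finset.add_sum_erase _ h (List.mem_toFinset.mpr hcr)).symm
    · rw [if_neg hcr, zero_add, Finset.erase_eq_self.mpr (by simp [hcr])]
  have h3 : ∑ x ∈ rest.toFinset.erase c, g x = ∑ x ∈ rest.toFinset.erase c, h x :=
    Finset.sum_congr rfl (fun x hx => hgh x (Finset.ne_of_mem_erase hx))
  rw [h1, Finset.sum_insert (Finset.notMem_erase c _), h3, h2]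
  omega

-- closed form: demand = sum over distinct word characters of the count overflow
theorem demandW_eq_sum (ws : List Char) : ∀ ls : List Char,
    demandW ls ws = ∑ c ∈ ws.toFinset,
      (if c = '?' then ws.count c else ws.count c - ls.count c) := by
  induction ws with
  | nil => intro ls; rfl
  | cons c rest ih =>
    intro ls
    by_cases hq : c = '?'
    · subst hq
      have hd : demandW ls ('?' :: rest) = 1 + demandW ls rest := by simp [demandW]
      have hs := sum_cons_split '?' rest
        (fun x => if x = '?' then ('?' :: rest).count x else ('?' :: rest).count x - ls.count x)
        (fun x => if x = '?' then rest.count x else rest.count x - ls.count x)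
        (by intro x hx
            simp [hx, Ne.symm hx])
      simp only [reduceIte, List.count_cons_self] at hs
      rw [hd, ih ls]
      by_cases hcr : '?' ∈ rest
      · rw [if_pos hcr] at hs; omega
      · rw [if_neg hcr] at hs
        have h0 : rest.count '?' = 0 := List.count_eq_zero_of_not_mem hcr
        omega
    · by_cases hm : c ∈ ls
      · have h1 : ls.count c ≥ 1 := List.one_le_count_iff.mpr hm
        have hd : demandW ls (c :: rest) = demandW (ls.erase c) rest := by
          simp [demandW, hq, hm]
        have hs := sum_cons_split c rest
          (fun x => if x = '?' then (c :: rest).count x else (c :: rest).count x - ls.count x)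
          (fun x => if x = '?' then rest.count x else rest.count x - (ls.erase c).count x)
          (by intro x hx
              simp [Ne.symm hx, List.count_erase_of_ne hx])
        simp only [if_neg hq, List.count_cons_self, List.count_erase_self] at hs
        rw [hd, ih (ls.erase c)]
        by_cases hcr : c ∈ rest
        · rw [if_pos hcr] at hs; omega
        · rw [if_neg hcr] at hs
          have hn : rest.count c = 0 := List.count_eq_zero_of_not_mem hcr
          omega
      · have h0 : ls.count c = 0 := List.count_eq_zero_of_not_mem hm
        have hd : demandW ls (c :: rest) = 1 + demandW ls rest := by
          simp [demandW, hq, hm]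
        have hs := sum_cons_split c rest
          (fun x => if x = '?' then (c :: rest).count x else (c :: rest).count x - ls.count x)
          (fun x => if x = '?' then rest.count x else rest.count x - ls.count x)
          (by intro x hx
              simp [Ne.symm hx])
        simp only [if_neg hq, List.count_cons_self] at hs
        rw [hd, ih ls]
        by_cases hcr : c ∈ rest
        · rw [if_pos hcr] at hs; omega
        · rw [if_neg hcr] at hs
          have hn : rest.count c = 0 := List.count_eq_zero_of_not_mem hcr
          omega

-- A's loop decided by the demand/supply comparison
theorem scrabbleLoopA_eq (ws : List Char) : ∀ ls : List Char,
    scrabbleLoopA ls ws = decide (demandW ls ws ≤ ls.count '?') := by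
  induction ws with
  | nil => intro ls; simp [scrabbleLoopA, demandW]
  | cons c rest ih =>
    intro ls
    by_cases hm : c ∈ ls
    · have hred : scrabbleLoopA ls (c :: rest) = scrabbleLoopA (ls.erase c) rest := by
        simp [scrabbleLoopA, hm]
      by_cases hq : c = '?'
      · subst hq
        have h1 : ls.count '?' ≥ 1 := List.one_le_count_iff.mpr hm
        have hcount : (ls.erase '?').count '?' = ls.count '?' - 1 := List.count_erase_self ..
        have hd : demandW ls ('?' :: rest) = 1 + demandW ls rest := by simp [demandW]
        rw [hred, ih, demandW_erase_q, hcount, hd, decide_eq_decide]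
        omega
      · have hcount : (ls.erase c).count '?' = ls.count '?' :=
          List.count_erase_of_ne (fun h => hq h.symm)
        have hd : demandW ls (c :: rest) = demandW (ls.erase c) rest := by
          simp [demandW, hq, hm]
        rw [hred, ih, hcount, hd]
    · have hd : demandW ls (c :: rest) = 1 + demandW ls rest := by
        simp [demandW, hm]
      by_cases hq2 : '?' ∈ ls
      · have h1 : ls.count '?' ≥ 1 := List.one_le_count_iff.mpr hq2
        have hcount : (ls.erase '?').count '?' = ls.count '?' - 1 := List.count_erase_self ..
        have hred : scrabbleLoopA ls (c :: rest) = scrabbleLoopA (ls.erase '?') rest := by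
          simp [scrabbleLoopA, hm, hq2]
        rw [hred, ih, demandW_erase_q, hcount, hd, decide_eq_decide]
        omega
      · have h0 : ls.count '?' = 0 := List.count_eq_zero_of_not_mem hq2
        have hred : scrabbleLoopA ls (c :: rest) = false := by
          simp [scrabbleLoopA, hm, hq2]
        rw [hred, hd, h0]
        simp

-- B's need-fold equals the cast of the Nat overflow sum
theorem alt_need_eq (wl ll : List Char) :
    ((PySem.Dict.counter wl).items.foldl
      (fun acc p => if p.1 = '?' then acc + p.2
        else acc + max 0 (p.2 - (PySem.Dict.counter ll).getD p.1 0)) (0 : Int))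
    = ((∑ c ∈ wl.toFinset, (if c = '?' then wl.count c else wl.count c - ll.count c) : ℕ) : ℤ) := by
  rw [PySem.Dict.items_counter]
  have hfold : ∀ (ds : List Char) (init : Int),
      ((ds.map (fun k => (k, (wl.count k : Int)))).foldl
        (fun acc p => if p.1 = '?' then acc + p.2
          else acc + max 0 (p.2 - (PySem.Dict.counter ll).getD p.1 0)) init)
      = init + (ds.map (fun c => ((if c = '?' then wl.count c else wl.count c - ll.count c : ℕ) : ℤ))).sum := by
    intro ds
    induction ds with
    | nil => intro init; simp
    | cons d ds ih =>
      intro init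
      simp only [List.map_cons, List.foldl_cons, List.sum_cons, ih]
      rw [PySem.Dict.getD_counter]
      by_cases hd : d = '?' <;> simp [hd] <;> [omega; (push_cast; omega)]
  have hnodup : (PySem.Set.ofList wl).Nodup := PySem.Set.nodup_ofList wl
  have hset : (PySem.Set.ofList wl).toFinset = wl.toFinset := by
    ext x; simp [List.mem_toFinset, PySem.Set.mem_ofList]
  rw [hfold, zero_add, Nat.cast_sum, ← hset, List.sum_toFinset _ hnodup]

-- ===== VERDICT (by name: the statement is the Claim_ definition above) =====
theorem scrabble_spec : Claim_equal_scrabble := by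
  intro letters word _
  unfold Spec_scrabble
  rw [scrabble_alt_def, alt_need_eq, PySem.Dict.getD_counter]
  unfold scrabble
  rw [scrabbleLoopA_eq, demandW_eq_sum, decide_eq_decide]
  exact_mod_cast Iff.rfl
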